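-- pv_equiv track=rewrite | github.com/k-yamauchi/hit_and_blow | hit_and_blow/agents/hybrid_bandit.py | _calculate_hits_blows
-- ===== SOURCE A (Python) =====
-- from collections import defaultdict, Counter
--
-- def _calculate_hits_blows(guess, answer):
--     """
--     予測と正解の間のヒットとブローを計算
--
--     Parameters
--     ----------
--     guess : list
--         予測の数字リスト
--     answer : list
--         正解の数字リスト
--
--     Returns
--     -------
--     tuple
--         (ヒット数, ブロー数)
--     """
--     hits = 0
--     blows = 0
--
--     # 同じ位置・同じ数字をカウント（ヒット）
--     for i in range(len(guess)):
--         if guess[i] == answer[i]: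
--             hits += 1
--
--     # 数字の出現回数をカウント
--     guess_counts = Counter(guess)
--     answer_counts = Counter(answer)
--
--     # 共通の数字をカウント
--     for digit, count in guess_counts.items():
--         blows += min(count, answer_counts[digit])
--
--     # ヒットの分を引く
--     blows -= hits
--
--     return hits, blows
-- ===== SOURCE B (Python) =====
-- def _calculate_hits_blows(guess, answer):
--     remaining = {}
--     for a in answer:
--         remaining[a] = remaining.get(a, 0) + 1
--     hits = 0
--     misses = []
--     for g, a in zip(guess, answer):
--         if g == a:
--             hits += 1
--             remaining[a] -= 1
--         else:
--             misses.append(g)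
--     blows = 0
--     for g in misses:
--         if remaining.get(g, 0) > 0:
--             remaining[g] -= 1
--             blows += 1
--     return hits, blows
-- ===== Notes on version B (the rewrite author's own statement) =====
-- stated objective: alternative
-- what changed: Replaced A's Counter-of-both-lists min-sum minus hits by a greedy matching pass: build a remaining-count multiset of the answer, consume it at hit positions while collecting missed guess digits, then count greedy matches of the misses against what remains; Pre_ excludes len(answer) < len(guess), where A raises IndexError.
import Mathlib
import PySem

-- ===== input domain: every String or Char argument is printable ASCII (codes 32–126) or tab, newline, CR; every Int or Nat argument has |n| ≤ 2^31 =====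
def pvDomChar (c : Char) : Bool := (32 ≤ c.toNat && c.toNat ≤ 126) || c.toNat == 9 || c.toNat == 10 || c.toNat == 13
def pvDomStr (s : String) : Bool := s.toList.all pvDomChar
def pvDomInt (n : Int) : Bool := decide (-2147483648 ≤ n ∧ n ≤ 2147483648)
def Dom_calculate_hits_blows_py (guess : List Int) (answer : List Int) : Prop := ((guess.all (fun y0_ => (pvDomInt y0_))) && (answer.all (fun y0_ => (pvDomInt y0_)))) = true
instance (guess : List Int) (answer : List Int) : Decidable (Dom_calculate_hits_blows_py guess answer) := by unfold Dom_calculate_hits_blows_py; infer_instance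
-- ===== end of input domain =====

-- B computes blows by greedy matching against a remaining-count multiset instead of A's Counter-min-sum minus hits (alternative decomposition, same behaviour).


-- ===== PORT A =====
def calculate_hits_blows_py (guess : List Int) (answer : List Int) : Int × Int :=
  -- for i in range(len(guess)): if guess[i] == answer[i]: hits += 1
  let hits : Int := (PySem.List.pyRange 0 (guess.length : Int) 1).foldl
    (fun acc i => if PySem.List.pyGetD guess i 0 == PySem.List.pyGetD answer i 0 then acc + 1 else acc) 0
  let guess_counts := PySem.Dict.counter guess
  let answer_counts := PySem.Dict.counter answer
  -- for digit, count in guess_counts.items(): blows += min(count, answer_counts[digit])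
  let blows : Int := guess_counts.items.foldl
    (fun acc dc => acc + min dc.2 (answer_counts.getD dc.1 0)) 0
  (hits, blows - hits)

-- ===== PORT B =====
def calculate_hits_blows_py_alt (guess : List Int) (answer : List Int) : Int × Int :=
  -- for a in answer: remaining[a] = remaining.get(a, 0) + 1
  let remaining : PySem.Dict Int Int :=
    answer.foldl (fun d x => d.insert x (d.getD x 0 + 1)) PySem.Dict.empty
  -- for g, a in zip(guess, answer): if g == a: hits += 1; remaining[a] -= 1
  --                                 else: misses.append(g)
  -- ('remaining[a] -= 1' always finds the key, a came from answer, so insert (getD - 1) is exact)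
  let st := (guess.zip answer).foldl
    (fun (st : Int × PySem.Dict Int Int × List Int) p =>
      if p.1 == p.2 then (st.1 + 1, st.2.1.insert p.2 (st.2.1.getD p.2 0 - 1), st.2.2)
      else (st.1, st.2.1, st.2.2 ++ [p.1]))
    (0, remaining, [])
  -- for g in misses: if remaining.get(g, 0) > 0: remaining[g] -= 1; blows += 1
  -- ('remaining[g] -= 1' only runs when the key is present, so insert (getD - 1) is exact)
  let res := st.2.2.foldl
    (fun (bs : Int × PySem.Dict Int Int) g =>
      if bs.2.getD g 0 > 0 then (bs.1 + 1, bs.2.insert g (bs.2.getD g 0 - 1)) else bs)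
    (0, st.2.1)
  (st.1, res.1)

-- ===== PRECONDITION & SPEC =====
-- Pre_ excludes inputs with len(answer) < len(guess): there A raises IndexError on answer[i].
def Pre_calculate_hits_blows_py (guess : List Int) (answer : List Int) : Prop :=
  guess.length ≤ answer.length
instance (guess : List Int) (answer : List Int) : Decidable (Pre_calculate_hits_blows_py guess answer) := by
  unfold Pre_calculate_hits_blows_py; infer_instance
def pvWitness_calculate_hits_blows_py : List Int × List Int := ([1, 2, 3], [3, 2, 4])

def Spec_calculate_hits_blows_py (guess : List Int) (answer : List Int) (out : Int × Int) : Prop := out = calculate_hits_blows_py_alt guess answer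
instance (guess : List Int) (answer : List Int) (out : Int × Int) : Decidable (Spec_calculate_hits_blows_py guess answer out) := by unfold Spec_calculate_hits_blows_py; infer_instance

-- ===== CLAIM (what is proved, stated in full; the proofs are below) =====
def Claim_equal_calculate_hits_blows_py : Prop := ∀ (guess : List Int) (answer : List Int), Dom_calculate_hits_blows_py guess answer → Pre_calculate_hits_blows_py guess answer → Spec_calculate_hits_blows_py guess answer (calculate_hits_blows_py guess answer)

-- ===== LEMMAS AND PROOFS =====

-- Reference (proof-side) recursions over the two lists in lockstep.
-- hbHit g a = the per-position hit flags (over the first |g| positions)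
def hbHit : List Int → List Int → List Bool
  | g :: gs, a :: as => (g == a) :: hbHit gs as
  | _, _ => []

-- hbH g a = the digits at hit positions
def hbH : List Int → List Int → List Int
  | g :: gs, a :: as => (if g == a then [g] else []) ++ hbH gs as
  | _, _ => []

-- hbLG g a = guess digits at non-hit positions
def hbLG : List Int → List Int → List Int
  | g :: gs, a :: as => (if g == a then [] else [g]) ++ hbLG gs as
  | _, _ => []

-- hbLA g a = answer digits at non-hit positions, plus answer's tail beyond |g|
def hbLA : List Int → List Int → List Int
  | g :: gs, a :: as => (if g == a then [] else [a]) ++ hbLA gs as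
  | [], as => as
  | _, [] => []

-- hbGC m r = the number of greedy matches of m against the multiset with multiplicities r
def hbGC : List Int → (Int → Int) → Int
  | [], _ => 0
  | g :: m, r =>
    if 0 < r g then 1 + hbGC m (fun d => if d = g then r g - 1 else r d) else hbGC m r

theorem hb_hit_range (g a : List Int) :
    (PySem.List.pyRange 0 (g.length : Int) 1).map
      (fun i => PySem.List.pyGetD g i 0 == PySem.List.pyGetD a i 0)
    = (List.range g.length).map (fun k => g.getD k 0 == a.getD k 0) := by
  rw [PySem.List.pyRange_one]
  simp [List.map_map, Function.comp_def, PySem.List.pyGetD_natCast]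

theorem hb_hit_eq (g a : List Int) (h : g.length ≤ a.length) :
    (List.range g.length).map (fun k => g.getD k 0 == a.getD k 0) = hbHit g a := by
  induction g generalizing a with
  | nil => simp [hbHit]
  | cons x gs ih =>
    cases a with
    | nil => simp at h
    | cons y as =>
      simp only [List.length_cons, List.range_succ_eq_map, List.map_cons, List.map_map,
        Function.comp_def, List.getD_cons_zero, List.getD_cons_succ, hbHit]
      rw [ih as (by simpa using h)]

theorem hb_countP_hit (g a : List Int) :
    (hbHit g a).countP (fun b => b) = (hbH g a).length := by
  induction g generalizing a with
  | nil => simp [hbHit, hbH]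
  | cons x gs ih =>
    cases a with
    | nil => simp [hbHit, hbH]
    | cons y as =>
      simp only [hbHit, hbH, List.countP_cons, List.length_append, ih as]
      by_cases hxy : x == y <;> simp [hxy] <;> omega

theorem hb_count_g (g a : List Int) (h : g.length ≤ a.length) (d : Int) :
    g.count d = (hbH g a).count d + (hbLG g a).count d := by
  induction g generalizing a with
  | nil => simp [hbH, hbLG]
  | cons x gs ih =>
    cases a with
    | nil => simp at h
    | cons y as =>
      have ih' := ih as (by simpa using h)
      simp only [hbH, hbLG, List.count_cons, List.count_append]
      by_cases hxy : x == y <;> simp [hxy, List.count_cons] <;> omega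

theorem hb_count_a (g a : List Int) (h : g.length ≤ a.length) (d : Int) :
    a.count d = (hbH g a).count d + (hbLA g a).count d := by
  induction g generalizing a with
  | nil => simp [hbH, hbLA]
  | cons x gs ih =>
    cases a with
    | nil => simp at h
    | cons y as =>
      have ih' := ih as (by simpa using h)
      simp only [hbH, hbLA, List.count_cons, List.count_append]
      by_cases hxy : x == y
      · have hxe : (x = d) = (y = d) := by simp at hxy; rw [hxy]
        simp [hxy, List.count_cons, hxe] <;> omega
      · simp [hxy, List.count_cons] <;> omega

theorem hb_mem_H (g a : List Int) (x : Int) : x ∈ hbH g a → x ∈ g := by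
  induction g generalizing a with
  | nil => simp [hbH]
  | cons z gs ih =>
    cases a with
    | nil => simp [hbH]
    | cons y as =>
      simp only [hbH, List.mem_append, List.mem_cons]
      rintro (h1 | h2)
      · by_cases hzy : z == y <;> simp [hzy] at h1 <;> simp [h1]
      · exact Or.inr (ih as h2)

theorem hb_mem_LG (g a : List Int) (x : Int) : x ∈ hbLG g a → x ∈ g := by
  induction g generalizing a with
  | nil => simp [hbLG]
  | cons z gs ih =>
    cases a with
    | nil => simp [hbLG]
    | cons y as =>
      simp only [hbLG, List.mem_append, List.mem_cons]
      rintro (h1 | h2)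
      · by_cases hzy : z == y <;> simp [hzy] at h1 <;> simp [h1]
      · exact Or.inr (ih as h2)

theorem hb_sum_indicator_zero (w : List Int) (x : Int) (hx : x ∉ w) :
    (w.map (fun d => if x = d then (1 : Int) else 0)).sum = 0 := by
  induction w with
  | nil => simp
  | cons c w' ih =>
    simp only [List.mem_cons, not_or] at hx
    simp [List.map_cons, ih hx.2, hx.1]

theorem hb_sum_indicator (w : List Int) (x : Int) (hw : w.Nodup) (hx : x ∈ w) :
    (w.map (fun d => if x = d then (1 : Int) else 0)).sum = 1 := by
  induction w with
  | nil => simp at hx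
  | cons c w' ih =>
    rcases List.mem_cons.mp hx with h1 | h2
    · subst h1
      simp [hb_sum_indicator_zero w' x (by simpa using (List.nodup_cons.mp hw).1)]
    · have hne : ¬ x = c := by
        intro hc; subst hc
        exact (List.nodup_cons.mp hw).1 h2
      simp [hne, ih (List.nodup_cons.mp hw).2 h2]

theorem hb_sum_count (w t : List Int) (hw : w.Nodup) (ht : ∀ x ∈ t, x ∈ w) :
    (w.map (fun d => (t.count d : Int))).sum = (t.length : Int) := by
  induction t with
  | nil => simp
  | cons x t' ih =>
    have hx := hb_sum_indicator w x hw (ht x (by simp))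
    have ht' : ∀ y ∈ t', y ∈ w := fun y hy => ht y (by simp [hy])
    have hmap : w.map (fun d => ((x :: t').count d : Int))
        = w.map (fun d => (t'.count d : Int) + (if x = d then (1 : Int) else 0)) := by
      apply List.map_congr_left
      intro d _
      simp only [List.count_cons]
      push_cast
      by_cases hxd : x = d <;> simp [hxd]
    rw [hmap, PySem.List.sum_map_add_int, hx, ih ht']
    simp [List.length_cons]

theorem hb_sum_restrict (w v : List Int) (f : Int → Int) (hw : w.Nodup) (hv : v.Nodup)
    (hsub : ∀ d ∈ v, d ∈ w) (hz : ∀ d ∈ w, d ∉ v → f d = 0) :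
    (w.map f).sum = (v.map f).sum := by
  rw [← List.sum_toFinset f hw, ← List.sum_toFinset f hv]
  exact (Finset.sum_subset
    (fun d hd => List.mem_toFinset.mpr (hsub d (List.mem_toFinset.mp hd)))
    (fun d hd hnd => hz d (List.mem_toFinset.mp hd) (fun hc => hnd (List.mem_toFinset.mpr hc)))).symm

theorem hb_main (g a : List Int) (h : g.length ≤ a.length) :
    ((PySem.Set.ofList g).map
      (fun k => min ((g.count k : Int)) ((a.count k : Int)))).sum
    = ((hbH g a).length : Int)
      + ((PySem.Set.ofList (hbLG g a)).map
          (fun d => min (((hbLG g a).count d : Int)) (((hbLA g a).count d : Int)))).sum := by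
  have hwnd : (PySem.Set.ofList g).Nodup := PySem.Set.nodup_ofList g
  have hvnd : (PySem.Set.ofList (hbLG g a)).Nodup := PySem.Set.nodup_ofList _
  have hmap : (PySem.Set.ofList g).map
      (fun k => min ((g.count k : Int)) ((a.count k : Int)))
      = (PySem.Set.ofList g).map
        (fun k => (((hbH g a).count k : Int)
          + min (((hbLG g a).count k : Int)) (((hbLA g a).count k : Int)))) := by
    apply List.map_congr_left
    intro k _
    have h1 := hb_count_g g a h k
    have h2 := hb_count_a g a h k
    have h1' : (g.count k : Int) = ((hbH g a).count k : Int) + ((hbLG g a).count k : Int) := by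
      exact_mod_cast congrArg (Nat.cast : Nat → Int) h1
    have h2' : (a.count k : Int) = ((hbH g a).count k : Int) + ((hbLA g a).count k : Int) := by
      exact_mod_cast congrArg (Nat.cast : Nat → Int) h2
    rw [h1', h2', min_add_add_left]
  rw [hmap, PySem.List.sum_map_add_int]
  congr 1
  · exact hb_sum_count _ _ hwnd
      (fun x hx => (PySem.Set.mem_ofList _ _).mpr (hb_mem_H g a x hx))
  · exact hb_sum_restrict _ _ _ hwnd hvnd
      (fun d hd => (PySem.Set.mem_ofList _ _).mpr
        (hb_mem_LG g a d ((PySem.Set.mem_ofList _ _).mp hd)))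
      (fun d _ hnd => by
        have hz : (hbLG g a).count d = 0 := by
          rw [List.count_eq_zero]
          exact fun hc => hnd ((PySem.Set.mem_ofList _ _).mpr hc)
        rw [hz]
        simp)

-- B's first loop (over zip guess answer): hits, the updated remaining dict, the miss list.
theorem hb_zip_fold (g a : List Int) : ∀ (h0 : Int) (r : PySem.Dict Int Int) (ms : List Int),
    ((g.zip a).foldl
      (fun (st : Int × PySem.Dict Int Int × List Int) p =>
        if p.1 == p.2 then (st.1 + 1, st.2.1.insert p.2 (st.2.1.getD p.2 0 - 1), st.2.2)
        else (st.1, st.2.1, st.2.2 ++ [p.1]))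
      (h0, r, ms)).1 = h0 + ((hbH g a).length : Int)
    ∧ ((g.zip a).foldl
      (fun (st : Int × PySem.Dict Int Int × List Int) p =>
        if p.1 == p.2 then (st.1 + 1, st.2.1.insert p.2 (st.2.1.getD p.2 0 - 1), st.2.2)
        else (st.1, st.2.1, st.2.2 ++ [p.1]))
      (h0, r, ms)).2.2 = ms ++ hbLG g a
    ∧ ∀ d, ((g.zip a).foldl
      (fun (st : Int × PySem.Dict Int Int × List Int) p =>
        if p.1 == p.2 then (st.1 + 1, st.2.1.insert p.2 (st.2.1.getD p.2 0 - 1), st.2.2)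
        else (st.1, st.2.1, st.2.2 ++ [p.1]))
      (h0, r, ms)).2.1.getD d 0 = r.getD d 0 - ((hbH g a).count d : Int) := by
  induction g generalizing a with
  | nil => intro h0 r ms; simp [hbH, hbLG]
  | cons x gs ih =>
    intro h0 r ms
    cases a with
    | nil => simp [hbH, hbLG]
    | cons y as =>
      simp only [List.zip_cons_cons, List.foldl_cons]
      by_cases hxy : x == y
      · have hx : x = y := by simpa using hxy
        obtain ⟨i1, i2, i3⟩ := ih as (h0 + 1) (r.insert y (r.getD y 0 - 1)) ms
        refine ⟨?_, ?_, ?_⟩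
        · rw [if_pos hxy, i1]
          simp [hbH, hxy]
          push_cast
          ring
        · rw [if_pos hxy, i2]
          simp [hbLG, hxy]
        · intro d
          rw [if_pos hxy, i3 d, PySem.Dict.getD_insert]
          simp only [hbH, hxy, if_true, List.count_append, List.count_cons, List.count_nil]
          subst hx
          by_cases hd : d = x
          · subst hd; simp; push_cast; ring
          · have : ¬ (x = d) := fun hc => hd hc.symm
            simp [hd, this]
      · obtain ⟨i1, i2, i3⟩ := ih as h0 r (ms ++ [x])
        refine ⟨?_, ?_, ?_⟩
        · rw [if_neg hxy, i1]; simp [hbH, hxy]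
        · rw [if_neg hxy, i2]; simp [hbLG, hxy]
        · intro d
          rw [if_neg hxy, i3 d]
          simp [hbH, hxy]

-- B's second loop equals the abstract greedy count hbGC.
theorem hb_greedy_fold (m : List Int) : ∀ (b : Int) (r : PySem.Dict Int Int),
    (m.foldl
      (fun (bs : Int × PySem.Dict Int Int) g =>
        if bs.2.getD g 0 > 0 then (bs.1 + 1, bs.2.insert g (bs.2.getD g 0 - 1)) else bs)
      (b, r)).1 = b + hbGC m (fun d => r.getD d 0) := by
  induction m with
  | nil => intro b r; simp [hbGC]
  | cons x m' ih =>
    intro b r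
    simp only [List.foldl_cons, hbGC]
    by_cases hx : 0 < r.getD x 0
    · rw [if_pos (by simpa using hx), if_pos hx, ih]
      have hf : (fun d => (r.insert x (r.getD x 0 - 1)).getD d 0)
          = fun d => if d = x then r.getD x 0 - 1 else r.getD d 0 := by
        funext d; rw [PySem.Dict.getD_insert]
      rw [hf]; ring
    · rw [if_neg (by simpa using hx), if_neg hx, ih]

-- The greedy count is the per-distinct-digit min with the (clamped) remaining multiplicities.
theorem hb_gc_sum (m : List Int) : ∀ r : Int → Int,
    hbGC m r = ∑ d ∈ m.toFinset, min ((m.count d : Int)) (max (r d) 0) := by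
  induction m with
  | nil => intro r; simp [hbGC]
  | cons x m' ih =>
    intro r
    simp only [hbGC, List.toFinset_cons]
    by_cases hm : x ∈ m'.toFinset
    · rw [Finset.insert_eq_self.mpr hm]
      rw [← Finset.add_sum_erase _ _ hm]
      by_cases hx : 0 < r x
      · rw [if_pos hx, ih, ← Finset.add_sum_erase _ _ hm]
        have hcon : ∑ d ∈ m'.toFinset.erase x,
            min ((m'.count d : Int)) (max ((if d = x then r x - 1 else r d)) 0)
            = ∑ d ∈ m'.toFinset.erase x,
              min (((x :: m').count d : Int)) (max (r d) 0) := by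
          apply Finset.sum_congr rfl
          intro d hd
          have hdx : d ≠ x := (Finset.mem_erase.mp hd).1
          have : (x :: m').count d = m'.count d := by
            simp [List.count_cons, hdx, Ne.symm hdx]
          rw [this, if_neg hdx]
        rw [hcon]
        have hcx : ((x :: m').count x : Int) = (m'.count x : Int) + 1 := by
          simp [List.count_cons]
        rw [hcx]
        have : (0 : Int) ≤ (m'.count x : Int) := Int.natCast_nonneg _
        omega
      · rw [if_neg hx, ih, ← Finset.add_sum_erase _ _ hm]
        have hcon : ∑ d ∈ m'.toFinset.erase x,
            min ((m'.count d : Int)) (max (r d) 0)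
            = ∑ d ∈ m'.toFinset.erase x,
              min (((x :: m').count d : Int)) (max (r d) 0) := by
          apply Finset.sum_congr rfl
          intro d hd
          have hdx : d ≠ x := (Finset.mem_erase.mp hd).1
          have : (x :: m').count d = m'.count d := by
            simp [List.count_cons, hdx, Ne.symm hdx]
          rw [this]
        rw [hcon]
        have hcx : ((x :: m').count x : Int) = (m'.count x : Int) + 1 := by
          simp [List.count_cons]
        rw [hcx]
        have h1 : (0 : Int) ≤ (m'.count x : Int) := Int.natCast_nonneg _
        omega
    · rw [Finset.sum_insert hm]
      have hxm : x ∉ m' := fun hc => hm (List.mem_toFinset.mpr hc)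
      have hc0 : m'.count x = 0 := List.count_eq_zero_of_not_mem hxm
      have hcx : ((x :: m').count x : Int) = 1 := by simp [List.count_cons, hc0]
      have hcon : ∀ f : Int → Int, ∑ d ∈ m'.toFinset,
          min ((m'.count d : Int)) (max (f d) 0)
          = ∑ d ∈ m'.toFinset, min (((x :: m').count d : Int)) (max (f d) 0) := by
        intro f
        apply Finset.sum_congr rfl
        intro d hd
        have hdx : d ≠ x := fun hc => hm (hc ▸ hd)
        have : (x :: m').count d = m'.count d := by
          simp [List.count_cons, hdx, Ne.symm hdx]
        rw [this]
      by_cases hx : 0 < r x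
      · rw [if_pos hx, ih, hcon]
        have hcon2 : ∑ d ∈ m'.toFinset,
            min (((x :: m').count d : Int)) (max ((if d = x then r x - 1 else r d)) 0)
            = ∑ d ∈ m'.toFinset, min (((x :: m').count d : Int)) (max (r d) 0) := by
          apply Finset.sum_congr rfl
          intro d hd
          have hdx : d ≠ x := fun hc => hm (hc ▸ hd)
          rw [if_neg hdx]
        rw [hcon2, hcx]
        omega
      · rw [if_neg hx, ih, hcon, hcx]
        omega

-- Bridge: A's leftover sum (list over the distinct leftover guess digits) is B's greedy Finset sum.
theorem hb_bridge (g a : List Int) (h : g.length ≤ a.length) :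
    ((PySem.Set.ofList (hbLG g a)).map
      (fun d => min (((hbLG g a).count d : Int)) (((hbLA g a).count d : Int)))).sum
    = ∑ d ∈ (hbLG g a).toFinset,
        min (((hbLG g a).count d : Int)) (max ((a.count d : Int) - ((hbH g a).count d : Int)) 0) := by
  have hnd : (PySem.Set.ofList (hbLG g a)).Nodup := PySem.Set.nodup_ofList _
  rw [← List.sum_toFinset _ hnd]
  have hset : (PySem.Set.ofList (hbLG g a)).toFinset = (hbLG g a).toFinset := by
    apply Finset.ext
    intro d
    simp [List.mem_toFinset, PySem.Set.mem_ofList]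
  rw [hset]
  apply Finset.sum_congr rfl
  intro d _
  have h2 := hb_count_a g a h d
  have h2' : (a.count d : Int) = ((hbH g a).count d : Int) + ((hbLA g a).count d : Int) := by
    exact_mod_cast congrArg (Nat.cast : Nat → Int) h2
  have hla : (0 : Int) ≤ ((hbLA g a).count d : Int) := Int.natCast_nonneg _
  omega

theorem hb_equiv (g a : List Int) (h : g.length ≤ a.length) :
    calculate_hits_blows_py g a = calculate_hits_blows_py_alt g a := by
  -- A's hits loop
  have hA : (PySem.List.pyRange 0 (g.length : Int) 1).foldl
      (fun acc i => if PySem.List.pyGetD g i 0 == PySem.List.pyGetD a i 0 then acc + 1 else acc) 0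
      = ((hbH g a).length : Int) := by
    rw [PySem.List.foldl_if_add_one]
    have hcm := List.countP_map (p := fun b => b)
      (f := fun i => PySem.List.pyGetD g i 0 == PySem.List.pyGetD a i 0)
      (l := PySem.List.pyRange 0 (g.length : Int) 1)
    simp only [Function.comp_def] at hcm
    rw [← hcm, (hb_hit_range g a).trans (hb_hit_eq g a h), hb_countP_hit]
    simp
  -- A's blows loop
  have hblowA : (PySem.Dict.counter g).items.foldl
      (fun acc dc => acc + min dc.2 ((PySem.Dict.counter a).getD dc.1 0)) 0
      = ((PySem.Set.ofList g).map
          (fun k => min ((g.count k : Int)) ((a.count k : Int)))).sum := by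
    rw [PySem.List.foldl_add, PySem.Dict.items_counter]
    simp [List.map_map, Function.comp_def, PySem.Dict.getD_counter]
  -- B's first loop
  obtain ⟨z1, z2, z3⟩ := hb_zip_fold g a 0 (PySem.Dict.counter a) []
  simp only [calculate_hits_blows_py, calculate_hits_blows_py_alt,
    PySem.Dict.foldl_insert_getD_add_one_eq_counter]
  rw [hA, hblowA, z1, z2, hb_greedy_fold]
  have hf : (fun d => ((g.zip a).foldl
      (fun (st : Int × PySem.Dict Int Int × List Int) p =>
        if p.1 == p.2 then (st.1 + 1, st.2.1.insert p.2 (st.2.1.getD p.2 0 - 1), st.2.2)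
        else (st.1, st.2.1, st.2.2 ++ [p.1]))
      (0, PySem.Dict.counter a, [])).2.1.getD d 0)
      = fun d => (a.count d : Int) - ((hbH g a).count d : Int) := by
    funext d
    rw [z3 d, PySem.Dict.getD_counter]
  rw [hf]
  simp only [List.nil_append]
  rw [hb_gc_sum, ← hb_bridge g a h, hb_main g a h]
  simp

-- ===== VERDICT (by name: the statement is the Claim_ definition above) =====
theorem calculate_hits_blows_py_spec : Claim_equal_calculate_hits_blows_py := by
  intro g a _ h
  unfold Spec_calculate_hits_blows_py
  exact hb_equiv g a h
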